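-- pv_equiv track=rewrite | github.com/noris-network/koris | kolt/kolt.py | get_host_zones
-- ===== SOURCE A (Python) =====
-- def distribute_hosts(hosts_zones):
--     """
--     Given  [(['host1', 'host2', 'host3'], 'A'), (['host4', 'host5'], 'B')]
--     return:
--     [(host1, zone),
--      (host2, zone),
--      (host3, zone),
--      (host4, zone),
--      (host5, zone)]
--     """
--     for item in hosts_zones:
--         hosts, zone = item[0], item[1]
--         for host in hosts:
--             yield [host, zone, None]
--
-- def get_host_zones(hosts, zones):
--     # brain fuck warning
--     # this divides the lists of hosts into zones
--     # >>> hosts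
--     # >>> ['host1', 'host2', 'host3', 'host4', 'host5']
--     # >>> zones
--     # >>> ['A', 'B']
--     # >>> list(zip([hosts[i:i + n] for i in range(0, len(hosts), n)], zones)) # noqa
--     # >>> [(['host1', 'host2', 'host3'], 'A'), (['host4', 'host5'], 'B')]  # noqa
--     if len(zones) == len(hosts):
--         return list(zip(hosts, zones))
--     else:
--         end = len(zones) + 1 if len(zones) % 2 else len(zones)
--         host_zones = list(zip([hosts[i:i + end] for i in
--                                range(0, len(hosts), end)],
--                               zones))
--         return distribute_hosts(host_zones)
-- ===== SOURCE B (Python) =====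
-- def get_host_zones(hosts, zones):
--     if len(zones) == len(hosts):
--         return list(zip(hosts, zones))
--     end = len(zones) + len(zones) % 2
--     n = min(len(hosts), end * len(zones))
--     return [[hosts[j], zones[j // end], None] for j in range(n)]
-- ===== Notes on version B (the rewrite author's own statement) =====
-- stated objective: alternative
-- what changed: In the unequal branch B replaces building chunk sublists, zipping them with zones and flattening via a generator by a single indexed list comprehension that maps host j directly to zone j//end, over min(len(hosts), end*len(zones)) indices.
-- crash fix: On zones == [] with hosts non-empty, A raises ValueError ('range() arg 3 must not be zero'); B returns []. — e.g. on get_host_zones(["h1"], []): A raises ValueError, B returns []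
import Mathlib
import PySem

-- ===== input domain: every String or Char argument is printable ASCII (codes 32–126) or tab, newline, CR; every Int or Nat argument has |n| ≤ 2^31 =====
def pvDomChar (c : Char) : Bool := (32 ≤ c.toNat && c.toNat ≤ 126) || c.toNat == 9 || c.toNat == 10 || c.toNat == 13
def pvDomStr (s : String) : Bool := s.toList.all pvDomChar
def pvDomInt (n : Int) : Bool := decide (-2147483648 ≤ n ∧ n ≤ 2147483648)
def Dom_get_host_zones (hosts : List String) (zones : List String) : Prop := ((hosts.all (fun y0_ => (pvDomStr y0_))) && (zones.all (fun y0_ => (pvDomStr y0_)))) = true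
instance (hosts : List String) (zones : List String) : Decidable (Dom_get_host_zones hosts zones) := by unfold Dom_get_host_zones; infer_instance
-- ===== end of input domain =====

-- B replaces A's chunk-slicing + zip + generator flattening by one indexed comprehension mapping
-- host j to zone j//end; equivalence proved on Pre_ (A raises ValueError when zones == [] and hosts ≠ []).


-- ===== PORT A =====
-- helper: the generator distribute_hosts, fully materialised (the caller iterates it)
def distribute_hosts (hosts_zones : List (List String × String)) : List (List (Option String)) :=
  hosts_zones.flatMap (fun item => item.1.map (fun host => [some host, some item.2, none]))

def get_host_zones (hosts : List String) (zones : List String) : List (List (Option String)) :=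
  if zones.length = hosts.length then
    (hosts.zip zones).map (fun p => [some p.1, some p.2])
  else
    let e : Nat := if zones.length % 2 = 1 then zones.length + 1 else zones.length
    let host_zones :=
      ((PySem.List.pyRange 0 (hosts.length : Int) (e : Int)).map
        (fun i => PySem.List.slice hosts (some i) (some (i + (e : Int))))).zip zones
    distribute_hosts host_zones

-- ===== PORT B =====
-- getD is exact here: every index used is a nonnegative in-range index (j < n ≤ len hosts, j/e < len zones)
def get_host_zones_alt (hosts : List String) (zones : List String) : List (List (Option String)) :=
  if zones.length = hosts.length then
    (hosts.zip zones).map (fun p => [some p.1, some p.2])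
  else
    let e : Nat := zones.length + zones.length % 2
    let n : Nat := min hosts.length (e * zones.length)
    (List.range n).map (fun j => [some (hosts.getD j ""), some (zones.getD (j / e) ""), none])

-- ===== PRECONDITION & SPEC =====
-- Pre_ excludes exactly the inputs where A raises ValueError (range step 0): zones empty with hosts non-empty.
def Pre_get_host_zones (hosts : List String) (zones : List String) : Prop :=
  zones ≠ [] ∨ hosts = []
instance (hosts : List String) (zones : List String) : Decidable (Pre_get_host_zones hosts zones) := by
  unfold Pre_get_host_zones; infer_instance

def pvWitness_get_host_zones : List String × List String := (["h1", "h2", "h3"], ["A", "B"])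

-- On zones == [] with hosts non-empty, A raises ValueError ('range() arg 3 must not be zero'); B returns [].
def Raises_get_host_zones (hosts : List String) (zones : List String) : Prop :=
  zones = [] ∧ hosts ≠ []
instance (hosts : List String) (zones : List String) : Decidable (Raises_get_host_zones hosts zones) := by
  unfold Raises_get_host_zones; infer_instance
def pvRaiseWitness_get_host_zones : List String × List String := (["h1"], [])
def pvRaiseWitnessOut_get_host_zones : List (List (Option String)) := []

def Spec_get_host_zones (hosts : List String) (zones : List String) (out : List (List (Option String))) : Prop := out = get_host_zones_alt hosts zones
instance (hosts : List String) (zones : List String) (out : List (List (Option String))) : Decidable (Spec_get_host_zones hosts zones out) := by unfold Spec_get_host_zones; infer_instance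

-- ===== CLAIM (what is proved, stated in full; the proofs are below) =====
def Claim_equal_get_host_zones : Prop := ∀ (hosts : List String) (zones : List String), Dom_get_host_zones hosts zones → Pre_get_host_zones hosts zones → Spec_get_host_zones hosts zones (get_host_zones hosts zones)

def Claim_raises_get_host_zones : Prop := (∀ (hosts : List String) (zones : List String), Dom_get_host_zones hosts zones → Raises_get_host_zones hosts zones → ¬ Pre_get_host_zones hosts zones) ∧ (Dom_get_host_zones (pvRaiseWitness_get_host_zones.1) (pvRaiseWitness_get_host_zones.2) ∧ Raises_get_host_zones (pvRaiseWitness_get_host_zones.1) (pvRaiseWitness_get_host_zones.2) ∧ get_host_zones_alt (pvRaiseWitness_get_host_zones.1) (pvRaiseWitness_get_host_zones.2) = pvRaiseWitnessOut_get_host_zones)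

-- ===== LEMMAS AND PROOFS =====

lemma chunks_closed (e : Nat) (he : 0 < e) (hosts : List String) :
    (PySem.List.pyRange 0 (hosts.length : Int) (e : Int)).map
      (fun i => PySem.List.slice hosts (some i) (some (i + (e : Int))))
    = (List.range ((hosts.length + e - 1) / e)).map (fun k => (hosts.drop (e * k)).take e) := by
  rw [PySem.List.pyRange_of_pos 0 (hosts.length : Int) (by exact_mod_cast he)]
  have hcnt : (if (0:Int) < (hosts.length : Int) then (((hosts.length : Int) - 0 + e - 1) / e).toNat else 0)
      = (hosts.length + e - 1) / e := by
    by_cases hL : 0 < hosts.length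
    · have h1 : ((hosts.length : Int) - 0 + e - 1) = ((hosts.length + e - 1 : Nat) : Int) := by
        omega
      simp only [if_pos (by exact_mod_cast hL : (0:Int) < (hosts.length:Int)), h1]
      rw [← Int.natCast_div]
      exact Int.toNat_natCast _
    · have hL0 : hosts.length = 0 := by omega
      simp only [hL0]
      norm_num
      exact (Nat.div_eq_of_lt (by omega)).symm
  rw [hcnt, List.map_map]
  apply List.map_congr_left
  intro k _
  simp only [Function.comp]
  have h1 : (0 : Int) + (e : Int) * (k : Nat) = ((e * k : Nat) : Int) := by push_cast; ring
  rw [h1, PySem.List.slice_natCast_add hosts (e*k) e]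

lemma drop_getD (l : List String) (m j : Nat) : (l.drop m).getD j "" = l.getD (m + j) "" := by
  simp [List.getD_eq_getElem?_getD, List.getElem?_drop]

lemma take_map_eq_range (l : List String) (e : Nat) (g : String → List (Option String)) :
    (l.take e).map g = (List.range (min l.length e)).map (fun j => g (l.getD j "")) := by
  refine List.ext_getElem (by simp [Nat.min_comm]) ?_
  intro i h1 h2
  simp only [List.getElem_map, List.getElem_take, List.getElem_range]
  have hi : i < l.length := by simp at h1; omega
  rw [List.getD_eq_getElem l "" hi]

lemma else_eq (e : Nat) (he : 0 < e) : ∀ (zones hosts : List String),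
    (((PySem.List.pyRange 0 (hosts.length : Int) (e : Int)).map
        (fun i => PySem.List.slice hosts (some i) (some (i + (e : Int))))).zip zones).flatMap
      (fun item => item.1.map (fun host => [some host, some item.2, none]))
    = (List.range (min hosts.length (e * zones.length))).map
        (fun j => [some (hosts.getD j ""), some (zones.getD (j / e) ""), none]) := by
  intro zones
  induction zones with
  | nil => intro hosts; simp
  | cons z zs ih =>
    intro hosts
    rw [chunks_closed e he hosts]
    by_cases hL : hosts.length = 0
    · have hnil : hosts = [] := List.length_eq_zero_iff.mp hL
      subst hnil
      have h0 : (e - 1) / e = 0 := Nat.div_eq_of_lt (by omega)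
      simp [h0]
    · have hN : (hosts.length + e - 1) / e = (hosts.length - 1) / e + 1 := by
        have h1 : hosts.length + e - 1 = (hosts.length - 1) + e := by omega
        rw [h1, Nat.add_div_right _ he]
      have hN' : (hosts.length - 1) / e = ((hosts.length - e) + e - 1) / e := by
        rcases Nat.lt_or_ge hosts.length e with hlt | hle
        · rw [Nat.div_eq_of_lt (by omega), Nat.div_eq_of_lt (by omega)]
        · congr 1; omega
      rw [hN, List.range_succ_eq_map, List.map_cons, List.map_map, List.zip_cons_cons,
          List.flatMap_cons]
      have hcs : (List.range ((hosts.length - 1) / e)).map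
            ((fun k => (hosts.drop (e * k)).take e) ∘ Nat.succ)
          = (List.range (((hosts.drop e).length + e - 1) / e)).map
            (fun k => ((hosts.drop e).drop (e * k)).take e) := by
        rw [List.length_drop, ← hN']
        apply List.map_congr_left
        intro k _
        simp only [Function.comp, List.drop_drop]
        rw [Nat.mul_succ, Nat.add_comm]
      rw [hcs, ← chunks_closed e he (hosts.drop e), ih (hosts.drop e)]
      -- now: take e hosts mapped ++ IH-result = range (min L (e*(Z+1))) mapped
      have hsplit : min hosts.length (e * (z :: zs).length)
          = min hosts.length e + min (hosts.drop e).length (e * zs.length) := by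
        simp only [List.length_cons, List.length_drop]
        have : e * (zs.length + 1) = e * zs.length + e := by ring
        omega
      rw [hsplit, List.range_add, List.map_append, List.map_map]
      congr 1
      · show (hosts.take e).map (fun host => [some host, some z, none]) = _
        rw [take_map_eq_range hosts e]
        apply List.map_congr_left
        intro j hj
        simp only [List.mem_range] at hj
        have : j / e = 0 := Nat.div_eq_of_lt (by omega)
        simp [this]
      · apply List.map_congr_left
        intro j hj
        simp only [List.mem_range, List.length_drop] at hj
        have hLe : e ≤ hosts.length := by omega
        have ha : min hosts.length e = e := by omega
        simp only [Function.comp, ha]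
        rw [drop_getD hosts e j]
        have : (e + j) / e = j / e + 1 := by
          rw [Nat.add_comm, Nat.add_div_right _ he]
        rw [this]
        simp

-- ===== VERDICT (by name: the statement is the Claim_ definition above) =====
theorem get_host_zones_raises : Claim_raises_get_host_zones := by
  unfold Claim_raises_get_host_zones
  constructor
  · intro hosts zones _ hr
    unfold Raises_get_host_zones at hr
    unfold Pre_get_host_zones
    simp [hr.1, hr.2]
  · exact ⟨by decide, by decide, by decide⟩

theorem get_host_zones_spec : Claim_equal_get_host_zones := by
  intro hosts zones hdom hpre
  unfold Spec_get_host_zones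
  by_cases hlen : zones.length = hosts.length
  · simp [get_host_zones, get_host_zones_alt, hlen]
  · simp only [get_host_zones, get_host_zones_alt, distribute_hosts, hlen, if_false]
    have hnr : ¬ Raises_get_host_zones hosts zones :=
      fun hr => get_host_zones_raises.1 hosts zones hdom hr hpre
    have hz : zones ≠ [] := by
      unfold Raises_get_host_zones at hnr
      intro hz0
      apply hlen
      have hh : hosts = [] := by
        by_contra hne; exact hnr ⟨hz0, hne⟩
      simp [hz0, hh]
    have he : 0 < zones.length := List.length_pos_iff.mpr hz
    have heq : (if zones.length % 2 = 1 then zones.length + 1 else zones.length)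
        = zones.length + zones.length % 2 := by
      rcases Nat.mod_two_eq_zero_or_one zones.length with h2 | h2 <;> simp [h2]
    rw [heq, else_eq (zones.length + zones.length % 2) (by omega) zones hosts]
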